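-- pv_equiv track=rewrite | github.com/Shubham92166/Data-Structures-and-Algorithm | Binary Search/specialInteger.py | solve
-- ===== SOURCE A (Python) =====
-- def solve(A, B):
--     l, r = 0, len(A)
--     while l <= r:
--         mid = l + (r-l)//2
--         if is_Valid(A, mid, B):
--             l = mid+1
--         else:
--             r = mid-1
--     return l-1
--
-- def is_Valid(A, k, B):
--     sum = 0
--     for i in range(len(A)):
--         sum += A[i]
--         if i >= k:
--             sum -= A[i-k]
--         if sum > B:
--             return False
--     return True
-- ===== SOURCE B (Python) =====
-- def solve(A, B):
--     # Prefix sums built once; each window tested as a prefix difference inside an all();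
--     # recursive divide-and-conquer in place of A's while-loop binary search.
--     n = len(A)
--     P = [0]
--     s = 0
--     for x in A:
--         s += x
--         P.append(s)
--
--     def ok(k):
--         return all(P[i + 1] - P[max(0, i - k + 1)] <= B for i in range(n))
--
--     def search(l, r):
--         if l > r:
--             return l - 1
--         mid = (l + r) // 2
--         return search(mid + 1, r) if ok(mid) else search(l, mid - 1)
--
--     return search(0, n)
-- ===== Notes on version B (the rewrite author's own statement) =====
-- stated objective: alternative
-- what changed: B precomputes a prefix-sum array and decides each candidate k by an all() over prefix differences P[i+1]-P[max(0,i-k+1)] (no running sliding sum, no early-return loop), and replaces A's iterative while-loop binary search by a recursive divide-and-conquer search with mid=(l+r)//2.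
import Mathlib
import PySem

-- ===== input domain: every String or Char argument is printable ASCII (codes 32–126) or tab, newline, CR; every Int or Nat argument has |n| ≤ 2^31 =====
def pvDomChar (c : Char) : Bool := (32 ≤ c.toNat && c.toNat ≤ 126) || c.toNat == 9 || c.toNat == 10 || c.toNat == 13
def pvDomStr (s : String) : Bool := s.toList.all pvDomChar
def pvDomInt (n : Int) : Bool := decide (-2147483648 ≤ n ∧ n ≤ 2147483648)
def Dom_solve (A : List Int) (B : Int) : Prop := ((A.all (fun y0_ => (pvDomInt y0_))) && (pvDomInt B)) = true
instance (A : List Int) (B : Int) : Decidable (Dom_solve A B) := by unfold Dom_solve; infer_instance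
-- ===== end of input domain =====

-- B precomputes prefix sums and decides each k by an all() over prefix differences, with a
-- recursive binary search in place of A's while loop; same results on all inputs (alternative, not faster).

-- ===== PORT A =====
-- is_Valid: running sliding-window sum, early return False when it exceeds B
def isValidGo (A : List Int) (k B : Int) (i : Nat) (s : Int) : Bool :=
  if h : i < A.length then
    let s1 := s + A[i]
    let s2 := if k ≤ (i : Int) then s1 - PySem.List.pyGetD A ((i : Int) - k) 0 else s1
    if s2 > B then false else isValidGo A k B (i + 1) s2
  else true
termination_by A.length - i
decreasing_by omega

def is_Valid (A : List Int) (k B : Int) : Bool := isValidGo A k B 0 0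

-- while l <= r binary search
def solveGo (A : List Int) (B l r : Int) : Int :=
  if l ≤ r then
    let mid := l + PySem.Int.floordiv (r - l) 2
    if is_Valid A mid B then solveGo A B (mid + 1) r else solveGo A B l (mid - 1)
  else l - 1
termination_by (r + 1 - l).toNat
decreasing_by
  all_goals
    have h2 : PySem.Int.floordiv (r - l) 2 = (r - l) / 2 :=
      PySem.Int.floordiv_eq_ediv_of_pos (by omega)
    simp only [h2] at *
    omega

def solve (A : List Int) (B : Int) : Int := solveGo A B 0 (A.length : Int)

-- ===== PORT B =====
-- prefix sums: running accumulator s, P = [0] followed by each partial sum (the for-loop of Source B)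
def psumsB (t : Int) : List Int → List Int
  | [] => []
  | x :: xs => (t + x) :: psumsB (t + x) xs

def prefixP (A : List Int) : List Int := 0 :: psumsB 0 A

-- ok(k): all() over the prefix differences, no early-return recursion and no running sum
def okB (P : List Int) (B k : Int) (n : Nat) : Bool :=
  (List.range n).all fun i =>
    PySem.List.pyGetD P ((i : Int) + 1) 0
      - PySem.List.pyGetD P (max 0 ((i : Int) - k + 1)) 0 ≤ B

-- recursive divide-and-conquer binary search, mid = (l+r)//2
def searchB (P : List Int) (B : Int) (n : Nat) (l r : Int) : Int :=
  if l > r then l - 1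
  else
    let mid := PySem.Int.floordiv (l + r) 2
    if okB P B mid n then searchB P B n (mid + 1) r else searchB P B n l (mid - 1)
termination_by (r + 1 - l).toNat
decreasing_by
  all_goals
    have h2 : PySem.Int.floordiv (l + r) 2 = (l + r) / 2 :=
      PySem.Int.floordiv_eq_ediv_of_pos (by omega)
    simp only [h2] at *
    omega

def solve_alt (A : List Int) (B : Int) : Int :=
  searchB (prefixP A) B A.length 0 (A.length : Int)

-- ===== PRECONDITION & SPEC =====
def Spec_solve (A : List Int) (B : Int) (out : Int) : Prop := out = solve_alt A B
instance (A : List Int) (B : Int) (out : Int) : Decidable (Spec_solve A B out) := by unfold Spec_solve; infer_instance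

-- ===== CLAIM (what is proved, stated in full; the proofs are below) =====
def Claim_equal_solve : Prop := ∀ (A : List Int) (B : Int), Dom_solve A B → Spec_solve A B (solve A B)

-- ===== LEMMAS AND PROOFS =====

lemma getD_psumsB (A : List Int) : ∀ (t : Int) (j : Nat), j < A.length →
    (psumsB t A).getD j 0 = t + (A.take (j + 1)).sum := by
  induction A with
  | nil => intro t j h; simp at h
  | cons x xs ih =>
    intro t j h
    cases j with
    | zero => simp [psumsB]
    | succ j =>
      simp only [psumsB, List.getD_cons_succ, List.take_succ_cons, List.sum_cons]
      rw [ih (t + x) j (by simpa using h)]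
      ring

lemma getD_prefixP (A : List Int) (j : Nat) (hj : j ≤ A.length) :
    (prefixP A).getD j 0 = (A.take j).sum := by
  unfold prefixP
  cases j with
  | zero => simp
  | succ j =>
    simp only [List.getD_cons_succ]
    rw [getD_psumsB A 0 j (by omega)]
    simp

lemma pyGetD_prefixP (A : List Int) (z : Int) (h0 : 0 ≤ z) (hz : z ≤ (A.length : Int)) :
    PySem.List.pyGetD (prefixP A) z 0 = (A.take z.toNat).sum := by
  have hcast : z = ((z.toNat : Nat) : Int) := by omega
  rw [hcast, PySem.List.pyGetD_natCast]
  exact getD_prefixP A z.toNat (by omega)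

-- okB restricted to the indices from i upward (the tail of the all())
def okTail (A P : List Int) (B k : Int) (i : Nat) : Bool :=
  (List.range' i (A.length - i)).all fun j =>
    PySem.List.pyGetD P ((j : Int) + 1) 0
      - PySem.List.pyGetD P (max 0 ((j : Int) - k + 1)) 0 ≤ B

lemma okB_eq_okTail (A P : List Int) (B k : Int) :
    okB P B k A.length = okTail A P B k 0 := by
  unfold okB okTail
  simp [List.range_eq_range']

-- the sliding-window invariant: A's running sum at step i equals B's prefix difference
lemma valid_eq_go (A : List Int) (B k : Int) (hk : 0 ≤ k) :
    ∀ (m i : Nat), A.length ≤ i + m →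
    isValidGo A k B i ((A.take i).sum - (A.take (max 0 ((i : Int) - k)).toNat).sum)
      = okTail A (prefixP A) B k i := by
  intro m
  induction m with
  | zero =>
    intro i h
    rw [isValidGo]
    rw [dif_neg (by omega)]
    unfold okTail
    rw [show A.length - i = 0 by omega]
    simp
  | succ m ih =>
    intro i h
    by_cases hi : i < A.length
    · rw [isValidGo]
      rw [dif_pos hi]
      have hs2 : (if k ≤ (i : Int) then
            ((A.take i).sum - (A.take (max 0 ((i : Int) - k)).toNat).sum + A[i]
              - PySem.List.pyGetD A ((i : Int) - k) 0)
          else ((A.take i).sum - (A.take (max 0 ((i : Int) - k)).toNat).sum + A[i]))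
          = (A.take (i + 1)).sum - (A.take (max 0 (((i : Nat) + 1 : Int) - k)).toNat).sum := by
        have htake : (A.take (i + 1)).sum = (A.take i).sum + A[i] :=
          List.sum_take_succ A i hi
        by_cases hki : k ≤ (i : Int)
        · rw [if_pos hki]
          have hidx : (i : Int) - k = ((i - k.toNat : Nat) : Int) := by omega
          have hlt : i - k.toNat < A.length := by omega
          have htake2 : (A.take (i - k.toNat + 1)).sum = (A.take (i - k.toNat)).sum + A[i - k.toNat] :=
            List.sum_take_succ A (i - k.toNat) hlt
          have hm0 : (max 0 ((i : Int) - k)).toNat = i - k.toNat := by omega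
          have hm1 : (max 0 (((i : Nat) + 1 : Int) - k)).toNat = i - k.toNat + 1 := by omega
          rw [hm0, hm1, hidx, PySem.List.pyGetD_natCast, List.getD_eq_getElem A 0 hlt, htake, htake2]
          ring
        · rw [if_neg hki]
          have hm0 : (max 0 ((i : Int) - k)).toNat = 0 := by omega
          have hm1 : (max 0 (((i : Nat) + 1 : Int) - k)).toNat = 0 := by omega
          rw [hm0, hm1, htake]
          ring
      have htest : PySem.List.pyGetD (prefixP A) ((i : Int) + 1) 0
          - PySem.List.pyGetD (prefixP A) (max 0 ((i : Int) - k + 1)) 0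
          = (A.take (i + 1)).sum - (A.take (max 0 (((i : Nat) + 1 : Int) - k)).toNat).sum := by
        rw [pyGetD_prefixP A ((i : Int) + 1) (by omega) (by omega)]
        rw [pyGetD_prefixP A (max 0 ((i : Int) - k + 1)) (by omega) (by omega)]
        have h1 : ((i : Int) + 1).toNat = i + 1 := by omega
        have h2 : max 0 ((i : Int) - k + 1) = max 0 (((i : Nat) + 1 : Int) - k) := by omega
        rw [h1, h2]
      have hcons : okTail A (prefixP A) B k i
          = ((decide (PySem.List.pyGetD (prefixP A) ((i : Int) + 1) 0
              - PySem.List.pyGetD (prefixP A) (max 0 ((i : Int) - k + 1)) 0 ≤ B))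
             && okTail A (prefixP A) B k (i + 1)) := by
        unfold okTail
        rw [show A.length - i = (A.length - (i + 1)) + 1 by omega, List.range'_succ]
        simp
      rw [hcons, htest]
      simp only [hs2]
      by_cases hgt : (A.take (i + 1)).sum - (A.take (max 0 (((i : Nat) + 1 : Int) - k)).toNat).sum > B
      · rw [if_pos hgt]
        simp [show ¬ ((A.take (i + 1)).sum - (A.take (max 0 (((i : Nat) + 1 : Int) - k)).toNat).sum ≤ B) by omega]
      · rw [if_neg hgt]
        have hih := ih (i + 1) (by omega)
        push_cast at hih
        rw [hih]
        simp [show (A.take (i + 1)).sum - (A.take (max 0 (((i : Nat) + 1 : Int) - k)).toNat).sum ≤ B by omega]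
    · rw [isValidGo]
      rw [dif_neg hi]
      unfold okTail
      rw [show A.length - i = 0 by omega]
      simp

lemma valid_eq (A : List Int) (B k : Int) (hk : 0 ≤ k) :
    is_Valid A k B = okB (prefixP A) B k A.length := by
  have h := valid_eq_go A B k hk A.length 0 (by omega)
  have hz : (max 0 (((0 : Nat) : Int) - k)).toNat = 0 := by omega
  rw [hz] at h
  rw [okB_eq_okTail]
  simpa [is_Valid] using h

lemma search_eq (A : List Int) (B : Int) :
    ∀ (n : Nat) (l r : Int), (r + 1 - l).toNat ≤ n → 0 ≤ l →
      solveGo A B l r = searchB (prefixP A) B A.length l r := by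
  intro n
  induction n with
  | zero =>
    intro l r hn hl
    rw [solveGo, searchB]
    simp only [if_neg (show ¬ l ≤ r by omega), if_pos (show l > r by omega)]
  | succ n ih =>
    intro l r hn hl
    by_cases hlr : l ≤ r
    · have hA : PySem.Int.floordiv (r - l) 2 = (r - l) / 2 :=
        PySem.Int.floordiv_eq_ediv_of_pos (by omega)
      have hB2 : PySem.Int.floordiv (l + r) 2 = (l + r) / 2 :=
        PySem.Int.floordiv_eq_ediv_of_pos (by omega)
      have hmid : l + PySem.Int.floordiv (r - l) 2 = PySem.Int.floordiv (l + r) 2 := by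
        rw [hA, hB2]; omega
      rw [solveGo, searchB]
      simp only [if_pos hlr, if_neg (show ¬ l > r by omega)]
      rw [hmid, valid_eq A B (PySem.Int.floordiv (l + r) 2) (by rw [hB2]; omega)]
      split_ifs with hv
      · exact ih _ r (by rw [hB2] at *; omega) (by rw [hB2]; omega)
      · exact ih l _ (by rw [hB2] at *; omega) hl
    · rw [solveGo, searchB]
      simp only [if_neg hlr, if_pos (show l > r by omega)]

-- ===== VERDICT (by name: the statement is the Claim_ definition above) =====
theorem solve_spec : Claim_equal_solve := by
  intro A B _
  unfold Spec_solve solve solve_alt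
  exact search_eq A B (A.length + 1) 0 (A.length : Int) (by omega) (by omega)
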